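-- pv_equiv track=rewrite | github.com/wim50594/sda-analysis | src/attack/disclosure/hitting_set.py | exact_hitting_sets
-- ===== SOURCE A (Python) =====
-- def exact_hitting_sets(observations: list[set[int]],
--                        max_size: int,
--                        current_set: set[int] | None = None) -> list[set[int]]:
--     """
--     Recursive algorithm to find all hitting sets of size <= max_size.
--
--     Parameters
--     ----------
--     observations : list of sets
--         Each set contains receiver indices that must be intersected.
--     max_size : int
--         Maximum allowed size of the hitting set.
--     current_set : set, optional
--         Current partial hitting set being constructed.
--
--     Returns
--     -------
--     list of sets
--         All valid hitting sets satisfying the observations.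
--     """
--     if current_set is None:
--         current_set = set()
--
--     # Base case: all observations are intersected
--     if not observations:
--         return [current_set]
--
--     # Base case: no room to add more elements
--     if max_size < 1:
--         return []
--
--     # Pick one observation to branch on
--     first_obs = next(iter(observations))
--     hitting_sets = []
--
--     for receiver in first_obs:
--         # Remaining observations that do not contain this receiver
--         remaining_obs = [obs for obs in observations if receiver not in obs]
--         for hs in exact_hitting_sets(remaining_obs, max_size - 1, current_set | {receiver}):
--             hitting_sets.append(hs)
--
--     return hitting_sets
-- ===== SOURCE B (Python) =====
-- def exact_hitting_sets(observations: list[set[int]],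
--                        max_size: int,
--                        current_set: set[int] | None = None) -> list[set[int]]:
--     """Iterative DFS with an explicit stack of (observations, budget, partial set) frames."""
--     start = set() if current_set is None else current_set
--     results = []
--     stack = [(observations, max_size, start)]
--     while stack:
--         obs, budget, partial = stack.pop()
--         if not obs:
--             results.append(partial)
--         elif budget >= 1:
--             first_obs = next(iter(obs))
--             # push children in reverse so they are explored in iteration order
--             for receiver in reversed(list(first_obs)):
--                 remaining_obs = [o for o in obs if receiver not in o]
--                 stack.append((remaining_obs, budget - 1, partial | {receiver}))
--     return results
-- ===== Notes on version B (the rewrite author's own statement) =====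
-- stated objective: alternative
-- what changed: Replaces the recursive enumeration by an iterative depth-first search over an explicit LIFO stack of (observations, budget, partial-set) frames, appending completed sets to a single results list.
import Mathlib
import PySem

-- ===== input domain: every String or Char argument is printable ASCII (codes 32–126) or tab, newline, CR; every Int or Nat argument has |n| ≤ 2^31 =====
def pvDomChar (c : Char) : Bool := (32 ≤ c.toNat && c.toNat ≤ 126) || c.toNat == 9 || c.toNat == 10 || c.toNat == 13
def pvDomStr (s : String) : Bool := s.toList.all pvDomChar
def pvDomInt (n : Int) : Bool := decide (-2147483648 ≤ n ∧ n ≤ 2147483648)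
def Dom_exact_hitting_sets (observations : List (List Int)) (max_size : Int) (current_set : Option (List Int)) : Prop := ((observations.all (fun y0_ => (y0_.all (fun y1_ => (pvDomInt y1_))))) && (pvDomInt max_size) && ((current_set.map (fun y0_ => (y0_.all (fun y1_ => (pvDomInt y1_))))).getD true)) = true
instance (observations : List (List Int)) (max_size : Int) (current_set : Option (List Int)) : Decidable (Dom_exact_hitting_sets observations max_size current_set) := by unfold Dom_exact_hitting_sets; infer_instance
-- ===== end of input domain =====

-- B replaces A's recursion by an iterative DFS over an explicit stack of frames (alternative
-- decomposition, same cost); proved to return the identical list. Fuel arguments are pure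
-- totality guards (every recursive call strictly shrinks max_size, so the stated fuel suffices).

-- ===== PORT A =====
-- literal port of the recursion; sets are PySem.Set lists of distinct elements.
-- fuel = max_size.toNat at every call (each recursive call passes max_size - 1 with max_size ≥ 1),
-- so the fuel-0 branch on a non-empty list with max_size ≥ 1 is never reached from the wrapper.
def exact_hitting_sets_go (fuel : Nat) (observations : List (List Int)) (max_size : Int) (cs : List Int) : List (List Int) :=
  match observations with
  | [] => [cs]                           -- base: all observations intersected
  | first_obs :: rest =>
    if max_size < 1 then []              -- base: no room to add more elements
    else
      match fuel with
      | 0 => []                          -- unreachable totality guard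
      | fuel' + 1 =>
        -- for receiver in first_obs: … hitting_sets.append(hs)
        first_obs.foldl (fun acc receiver =>
          acc ++ exact_hitting_sets_go fuel'
            ((first_obs :: rest).filter (fun obs => !obs.contains receiver))
            (max_size - 1) (PySem.Set.union cs [receiver])) []

def exact_hitting_sets (observations : List (List Int)) (max_size : Int) (current_set : Option (List Int)) : List (List Int) :=
  -- if current_set is None: current_set = set()
  exact_hitting_sets_go max_size.toNat observations max_size (current_set.getD [])

-- ===== PORT B =====
-- node count of the DFS tree: fuel bound for the stack loop (proof-side bound, fuel = m.toNat)
def pvHSCount (fuel : Nat) (obs : List (List Int)) (m : Int) : Nat :=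
  match obs with
  | [] => 1
  | first_obs :: rest =>
    if m < 1 then 1
    else
      match fuel with
      | 0 => 1
      | fuel' + 1 =>
        1 + (first_obs.map (fun receiver =>
          pvHSCount fuel' ((first_obs :: rest).filter (fun obs => !obs.contains receiver)) (m - 1))).sum

-- one iteration of the for-loop over reversed(list(first_obs)): push the child frames
def pvPushChildren (first_obs : List Int) (tl : List (List Int)) (budget : Int) (part : List Int)
    (rest : List (List (List Int) × Int × List Int)) : List (List (List Int) × Int × List Int) :=
  first_obs.reverse.foldl (fun st receiver =>
    ((first_obs :: tl).filter (fun obs => !obs.contains receiver), budget - 1,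
      PySem.Set.union part [receiver]) :: st) rest

-- the while-loop of Source B; the stack's head is its top
def pvHSLoop (fuel : Nat) (stack : List (List (List Int) × Int × List Int)) (results : List (List Int)) : List (List Int) :=
  match fuel with
  | 0 => results                         -- unreachable totality guard (fuel = total node count)
  | fuel' + 1 =>
    match stack with
    | [] => results
    | (obs, budget, part) :: rest =>
      match obs with
      | [] => pvHSLoop fuel' rest (results ++ [part])
      | first_obs :: tl =>
        if budget ≥ 1 then
          pvHSLoop fuel' (pvPushChildren first_obs tl budget part rest) results
        else pvHSLoop fuel' rest results

def exact_hitting_sets_alt (observations : List (List Int)) (max_size : Int) (current_set : Option (List Int)) : List (List Int) :=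
  let start := match current_set with | none => [] | some s => s
  pvHSLoop (pvHSCount max_size.toNat observations max_size) [(observations, max_size, start)] []

-- ===== PRECONDITION & SPEC =====
def Spec_exact_hitting_sets (observations : List (List Int)) (max_size : Int) (current_set : Option (List Int)) (out : List (List Int)) : Prop := out = exact_hitting_sets_alt observations max_size current_set
instance (observations : List (List Int)) (max_size : Int) (current_set : Option (List Int)) (out : List (List Int)) : Decidable (Spec_exact_hitting_sets observations max_size current_set out) := by unfold Spec_exact_hitting_sets; infer_instance

-- ===== CLAIM (what is proved, stated in full; the proofs are below) =====
def Claim_equal_exact_hitting_sets : Prop := ∀ (observations : List (List Int)) (max_size : Int) (current_set : Option (List Int)), Dom_exact_hitting_sets observations max_size current_set → Spec_exact_hitting_sets observations max_size current_set (exact_hitting_sets observations max_size current_set)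

-- ===== LEMMAS AND PROOFS =====

-- pushing a reversed list of children one by one = prepending them in order
theorem pvPush_eq {α β : Type} (l : List α) (child : α → β) (st : List β) :
    l.reverse.foldl (fun s r => child r :: s) st = l.map child ++ st := by
  rw [List.foldl_reverse]
  induction l with
  | nil => rfl
  | cons a t ih => simp [ih]

theorem pvPushChildren_eq (first_obs : List Int) (tl : List (List Int)) (budget : Int) (part : List Int)
    (rest : List (List (List Int) × Int × List Int)) :
    pvPushChildren first_obs tl budget part rest
      = first_obs.map (fun receiver =>
          ((first_obs :: tl).filter (fun obs => !obs.contains receiver), budget - 1,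
            PySem.Set.union part [receiver])) ++ rest := by
  unfold pvPushChildren
  rw [pvPush_eq]

theorem pvHSCount_nil (fuel : Nat) (m : Int) : pvHSCount fuel [] m = 1 := by
  rw [pvHSCount.eq_def]

theorem pvHSCount_pos (fuel : Nat) (obs : List (List Int)) (m : Int) : 1 ≤ pvHSCount fuel obs m := by
  cases obs with
  | nil => simp [pvHSCount_nil]
  | cons a t =>
      rw [pvHSCount.eq_def]
      simp only
      split
      · omega
      · cases fuel <;> simp

-- A's foldl-append loop is a flatMap
theorem pvA_nonempty (first_obs : List Int) (rest : List (List Int)) (m : Int) (cs : Option (List Int))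
    (hm : ¬ m < 1) :
    exact_hitting_sets (first_obs :: rest) m cs
      = first_obs.flatMap (fun receiver =>
          exact_hitting_sets ((first_obs :: rest).filter (fun obs => !obs.contains receiver))
            (m - 1) (some (PySem.Set.union (cs.getD []) [receiver]))) := by
  unfold exact_hitting_sets
  have hf : m.toNat = (m - 1).toNat + 1 := by omega
  rw [hf, exact_hitting_sets_go.eq_def]
  simp only [if_neg hm]
  rw [PySem.List.foldl_append_eq_flatMap]
  simp

-- the count of a branching frame, fuel in step with the budget
theorem pvHSCount_nonempty (first_obs : List Int) (rest : List (List Int)) (m : Int) (hm : ¬ m < 1) :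
    pvHSCount m.toNat (first_obs :: rest) m
      = 1 + (first_obs.map (fun receiver =>
          pvHSCount (m - 1).toNat ((first_obs :: rest).filter (fun obs => !obs.contains receiver)) (m - 1))).sum := by
  have hf : m.toNat = (m - 1).toNat + 1 := by omega
  rw [hf, pvHSCount.eq_def]
  simp only [if_neg hm]

-- the loop flushes its whole stack: results ++ the recursive answers of the frames, in order;
-- any fuel at least the total per-frame node count suffices
theorem pvHSLoop_eq (fuel : Nat) (stack : List (List (List Int) × Int × List Int)) (results : List (List Int))
    (hfuel : (stack.map (fun f => pvHSCount f.2.1.toNat f.1 f.2.1)).sum ≤ fuel) :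
    pvHSLoop fuel stack results
      = results ++ (stack.map (fun f => exact_hitting_sets f.1 f.2.1 (some f.2.2))).flatten := by
  induction fuel generalizing stack results with
  | zero =>
      cases stack with
      | nil => simp [pvHSLoop]
      | cons f rest =>
          exfalso
          have := pvHSCount_pos f.2.1.toNat f.1 f.2.1
          simp only [List.map_cons, List.sum_cons] at hfuel
          omega
  | succ n ih =>
      cases stack with
      | nil => simp [pvHSLoop]
      | cons f rest =>
          obtain ⟨obs, budget, part⟩ := f
          simp only [List.map_cons, List.sum_cons] at hfuel
          cases obs with
          | nil =>
              rw [pvHSLoop]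
              rw [ih rest (results ++ [part]) (by rw [pvHSCount_nil] at hfuel; omega)]
              have hA : exact_hitting_sets [] budget (some part) = [part] := by
                unfold exact_hitting_sets
                rw [exact_hitting_sets_go.eq_def]
                simp
              simp [hA]
          | cons first_obs tl =>
              rw [pvHSLoop]
              by_cases hb : budget ≥ 1
              · rw [if_pos hb]
                have hcnt := pvHSCount_nonempty first_obs tl budget (by omega)
                have hmeas : ((pvPushChildren first_obs tl budget part rest).map
                    (fun f => pvHSCount f.2.1.toNat f.1 f.2.1)).sum ≤ n := by
                  rw [pvPushChildren_eq]
                  simp only [List.map_append, List.map_map, List.sum_append, Function.comp_def]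
                  rw [hcnt] at hfuel
                  omega
                rw [ih _ results hmeas, pvPushChildren_eq]
                simp only [List.map_cons, List.map_append, List.map_map, List.flatten_cons,
                  List.flatten_append, Function.comp_def]
                rw [pvA_nonempty first_obs tl budget (some part) (by omega)]
                simp [List.flatMap_def]
              · rw [if_neg hb]
                have h1 : pvHSCount budget.toNat (first_obs :: tl) budget = 1 := by
                  rw [pvHSCount.eq_def]
                  simp only [if_pos (show budget < 1 by omega)]
                rw [ih rest results (by rw [h1] at hfuel; omega)]
                have hA : exact_hitting_sets (first_obs :: tl) budget (some part) = [] := by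
                  unfold exact_hitting_sets
                  rw [exact_hitting_sets_go.eq_def]
                  simp only [if_pos (show budget < 1 by omega)]
                simp [hA]

-- ===== VERDICT (by name: the statement is the Claim_ definition above) =====
theorem exact_hitting_sets_spec : Claim_equal_exact_hitting_sets := by
  intro obs m cso _
  unfold Spec_exact_hitting_sets exact_hitting_sets_alt
  rw [pvHSLoop_eq _ _ _ (by simp)]
  cases cso with
  | none => simp [exact_hitting_sets]
  | some s => simp [exact_hitting_sets]
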